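-- pv_equiv track=rewrite | github.com/zjma/codegames | cf1567/f.py | solve0
-- ===== SOURCE A (Python) =====
-- def adjCoors(ri,ci):
--     yield (ri,ci+1)
--     yield (ri,ci-1)
--     yield (ri-1,ci)
--     yield (ri+1,ci)
--
-- def solve0(map):
--     rn=len(map)
--     cn=len(map[0])
--     matters=set()
--     def nextCoor(ri,ci):
--         if ci==cn-1: return (ri+1,0)
--         return (ri,ci+1)
--     def explore(ri,ci,ans):
--         if ri==rn:
--             for rj in range(rn):
--                 for cj in range(cn):
--                     if map[rj][cj]=='X' and sum(ans[x][y] for x,y in adjCoors(rj,cj))%5!=0: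
--                         return False
--             return True
--         ri2,ci2=nextCoor(ri,ci)
--         if map[ri][ci]=='.':
--             ans[ri][ci]=1
--             if explore(ri2,ci2,ans):
--                 return True
--             ans[ri][ci]=4
--             if explore(ri2,ci2,ans):
--                 return True
--             return False
--         return explore(ri2,ci2,ans)
--
--     ans=[[0 for _ in range(cn)] for _ in range(rn)]
--     if explore(0,0,ans):
--         return ans
--     else:
--         return None
-- ===== SOURCE B (Python) =====
-- def solve0(map):
--     rn = len(map)
--     cn = len(map[0])
--     dots = [(r, c) for r in range(rn) for c in range(cn) if map[r][c] == '.']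
--     xs = [(r, c) for r in range(rn) for c in range(cn) if map[r][c] == 'X']
--     n = len(dots)
--     for m in range(1 << n):
--         vals = [1 if (m >> (n - 1 - i)) & 1 == 0 else 4 for i in range(n)]
--         grid = [[0] * cn for _ in range(rn)]
--         for (r, c), v in zip(dots, vals):
--             grid[r][c] = v
--         if all((grid[r][c + 1] + grid[r][c - 1] + grid[r - 1][c] + grid[r + 1][c]) % 5 == 0
--                for r, c in xs):
--             return grid
--     return None
-- ===== Notes on version B (the rewrite author's own statement) =====
-- stated objective: alternative
-- what changed: Replaces the mutating recursive backtracking DFS over grid cells with a flat iterative enumeration of the 2^n dot-assignments as ascending bitmasks (first dot = most significant bit, bit 0 -> value 1, so the same 1-before-4 lexicographic order), building a fresh grid per mask and checking the collected 'X' cells in row-major order with all(); recursion, mutation and backtracking disappear.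
-- outside the precondition, e.g. on solve0([['X', '.'], ['X', '.'], ['X', '.']]): A returns None, B returns None
import Mathlib
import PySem

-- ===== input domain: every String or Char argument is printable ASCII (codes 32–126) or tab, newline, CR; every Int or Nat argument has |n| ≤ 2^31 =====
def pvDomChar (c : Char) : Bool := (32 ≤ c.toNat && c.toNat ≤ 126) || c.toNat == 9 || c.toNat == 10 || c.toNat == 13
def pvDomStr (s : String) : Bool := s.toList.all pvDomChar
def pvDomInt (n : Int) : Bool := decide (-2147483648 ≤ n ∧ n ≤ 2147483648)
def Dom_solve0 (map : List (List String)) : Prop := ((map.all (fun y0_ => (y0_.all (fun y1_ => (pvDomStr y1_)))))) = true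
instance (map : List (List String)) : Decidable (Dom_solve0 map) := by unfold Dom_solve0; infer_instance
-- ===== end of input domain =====

-- B replaces A's mutating recursive backtracking over grid cells by a flat iteration over the 2^n
-- dot-assignments as ascending bitmasks (same 1-before-4 lexicographic order), one fresh grid per mask.

-- ===== PORT A =====
-- shared cell accessors (both Pythons index `map`/the grid the same way); the defaults are only
-- reachable where the Python raises IndexError (excluded by Pre_solve0)
def cellStr (map : List (List String)) (r c : Nat) : String :=
  (map.getD r []).getD c ""

def getC (g : List (List Int)) (i j : Int) : Int :=
  (PySem.List.pyGet? ((PySem.List.pyGet? g i).getD []) j).getD 0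

def setCell (g : List (List Int)) (r c : Nat) (v : Int) : List (List Int) :=
  g.set r ((g.getD r []).set c v)

def adjCoors (ri ci : Int) : List (Int × Int) :=
  [(ri, ci + 1), (ri, ci - 1), (ri - 1, ci), (ri + 1, ci)]

-- the leaf check of `explore` (the double loop with early `return False` has the same value as `all`)
def checkA (map : List (List String)) (rn cn : Nat) (ans : List (List Int)) : Bool :=
  (List.range rn).all fun rj => (List.range cn).all fun cj =>
    !(cellStr map rj cj == "X" &&
      !(PySem.Int.mod ((adjCoors (rj : Int) (cj : Int)).foldl (fun s p => s + getC ans p.1 p.2) 0) 5 == 0))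

def explore (map : List (List String)) (rn cn : Nat) :
    Nat → Nat → Nat → List (List Int) → Bool × List (List Int)
  | 0, _, _, ans => (false, ans)
  | fuel + 1, ri, ci, ans =>
    if ri = rn then (checkA map rn cn ans, ans)
    else
      let p := if ci = cn - 1 then (ri + 1, 0) else (ri, ci + 1)
      if cellStr map ri ci == "." then
        let r1 := explore map rn cn fuel p.1 p.2 (setCell ans ri ci 1)
        if r1.1 then r1
        else
          let r4 := explore map rn cn fuel p.1 p.2 (setCell r1.2 ri ci 4)
          if r4.1 then r4 else (false, r4.2)
      else explore map rn cn fuel p.1 p.2 ans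

def solve0 (map : List (List String)) : Option (List (List Int)) :=
  let rn := map.length
  let cn := (map.headD []).length
  let ans := List.replicate rn (List.replicate cn (0 : Int))
  let r := explore map rn cn (rn * cn + cn) 0 0 ans
  if r.1 then some r.2 else none

-- ===== PORT B =====
def dotsOf (map : List (List String)) (rn cn : Nat) : List (Nat × Nat) :=
  (List.range rn).flatMap fun r => (List.range cn).filterMap fun c =>
    if cellStr map r c == "." then some (r, c) else none

def xsOf (map : List (List String)) (rn cn : Nat) : List (Nat × Nat) :=
  (List.range rn).flatMap fun r => (List.range cn).filterMap fun c =>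
    if cellStr map r c == "X" then some (r, c) else none

def buildGrid (rn cn : Nat) (dots : List (Nat × Nat)) (n m : Nat) : List (List Int) :=
  let vals : List Int := (List.range n).map fun i => if (m >>> (n - 1 - i)) &&& 1 == 0 then 1 else 4
  (dots.zip vals).foldl (fun g pv => setCell g pv.1.1 pv.1.2 pv.2)
    (List.replicate rn (List.replicate cn (0 : Int)))

def checkB (g : List (List Int)) (xs : List (Nat × Nat)) : Bool :=
  xs.all fun p =>
    PySem.Int.mod (getC g (p.1 : Int) ((p.2 : Int) + 1) + getC g (p.1 : Int) ((p.2 : Int) - 1) +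
      getC g ((p.1 : Int) - 1) (p.2 : Int) + getC g ((p.1 : Int) + 1) (p.2 : Int)) 5 == 0

def loopB (rn cn n : Nat) (dots xs : List (Nat × Nat)) : List Nat → Option (List (List Int))
  | [] => none
  | m :: rest =>
    let g := buildGrid rn cn dots n m
    if checkB g xs then some g else loopB rn cn n dots xs rest

def solve0_alt (map : List (List String)) : Option (List (List Int)) :=
  let rn := map.length
  let cn := (map.headD []).length
  let dots := dotsOf map rn cn
  let xs := xsOf map rn cn
  let n := dots.length
  loopB rn cn n dots xs (List.range (1 <<< n))

-- ===== PRECONDITION & SPEC =====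
-- number of the four neighbour TERMS ans[r][c+1], ans[r][c-1], ans[r-1][c], ans[r+1][c] (Python's
-- negative indices wrap) that read a '.' cell; if this is ODD the X-sum at (r,c) is ≡ ±1 or ±3 mod 5
-- for every 1/4 assignment, so that 'X' fails the check at every leaf of the search
def dotCnt (map : List (List String)) (rn cn r c : Nat) : Nat :=
  (if cellStr map r (c + 1) = "." then 1 else 0) +
  (if cellStr map r (if c = 0 then cn - 1 else c - 1) = "." then 1 else 0) +
  (if cellStr map (if r = 0 then rn - 1 else r - 1) c = "." then 1 else 0) +
  (if cellStr map (r + 1) c = "." then 1 else 0)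

-- shadowed map rn cn r c: some 'X' strictly earlier in row-major order than (r,c), not on the last
-- row/column, has an odd dotCnt — that 'X' fails the check at every leaf, so the scan never gets past it
def shadowed (map : List (List String)) (rn cn r c : Nat) : Bool :=
  (List.range rn).any fun r' => (List.range cn).any fun c' =>
    (decide (r' < r) || (r' == r && decide (c' < c))) &&
    decide (r' + 1 < rn) && decide (c' + 1 < cn) &&
    (cellStr map r' c' == "X") && (dotCnt map rn cn r' c' % 2 == 1)

-- Pre_ excludes exactly shapes on which Python A raises IndexError — an empty map or empty first row,
-- a row shorter than the first, or an 'X' on the last row/column (whose right or down neighbour falls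
-- off the grid) that the check scan can reach; a boundary 'X' is re-admitted when an earlier (row-major)
-- in-grid 'X' with an odd number of dot-neighbour terms shadows it (that 'X' fails at every leaf, so A
-- returns None and never reaches the boundary 'X'). The exact reachability of a boundary 'X' depends on
-- the search itself and is not closed-form, so Pre_ keeps only the statically certifiable non-crashing
-- maps and thereby also excludes some maps where the shadowing has another cause and A returns None
-- (both programs return None there, see cites).
def Pre_solve0 (map : List (List String)) : Prop :=
  map ≠ [] ∧
  1 ≤ (map.headD []).length ∧
  (∀ row ∈ map, (map.headD []).length ≤ row.length) ∧
  (∀ r < map.length, ∀ c < (map.headD []).length,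
    cellStr map r c = "X" → (r + 1 = map.length ∨ c + 1 = (map.headD []).length) →
      shadowed map map.length (map.headD []).length r c = true)
instance (map : List (List String)) : Decidable (Pre_solve0 map) := by unfold Pre_solve0; infer_instance

def pvWitness_solve0 : List (List String) := [["X", ".", "."], [".", ".", "."], [".", ".", "."]]

def Spec_solve0 (map : List (List String)) (out : Option (List (List Int))) : Prop := out = solve0_alt map
instance (map : List (List String)) (out : Option (List (List Int))) : Decidable (Spec_solve0 map out) := by unfold Spec_solve0; infer_instance

-- ===== CLAIM (what is proved, stated in full; the proofs are below) =====
def Claim_equal_solve0 : Prop := ∀ (map : List (List String)), Dom_solve0 map → Pre_solve0 map → Spec_solve0 map (solve0 map)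
-- ===== LEMMAS AND PROOFS =====

-- entry/row-length accessors used by the agreement relation
def ent (a : List (List Int)) (r c : Nat) : Int := (a.getD r []).getD c 0
def rowLen (a : List (List Int)) (r : Nat) : Nat := (a.getD r []).length

-- `AgreeOff D a b`: same shape, and equal entries outside the coordinate set D
def AgreeOff (D : List (Nat × Nat)) (a b : List (List Int)) : Prop :=
  a.length = b.length ∧ (∀ r, rowLen a r = rowLen b r) ∧
  (∀ r c, (r, c) ∉ D → ent a r c = ent b r c)

-- the dots of the cells from (ri,ci) (row-major) to the end of the grid, in A's visiting order
def dotsFrom (map : List (List String)) (rn cn ri ci : Nat) : List (Nat × Nat) :=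
  if h : rn ≤ ri ∨ cn ≤ ci then []
  else
    let p := if ci = cn - 1 then (ri + 1, 0) else (ri, ci + 1)
    (if cellStr map ri ci == "." then [(ri, ci)] else []) ++ dotsFrom map rn cn p.1 p.2
termination_by (rn - ri) * cn + (cn - ci)
decreasing_by
  rw [not_or] at h; obtain ⟨h1, h2⟩ := h
  have e1 : (rn - (ri + 1)) * cn + cn = (rn - ri) * cn := by
    have e : rn - ri = (rn - (ri + 1)) + 1 := by omega
    rw [e]; ring
  split
  · simp only
    omega
  · simp only
    omega

-- the backtracking search over a dot list, setting 1 then 4, functionally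
def searchS (map : List (List String)) (rn cn : Nat) (g : List (List Int)) :
    List (Nat × Nat) → Option (List (List Int))
  | [] => if checkA map rn cn g then some g else none
  | d :: ds =>
    match searchS map rn cn (setCell g d.1 d.2 1) ds with
    | some g' => some g'
    | none => searchS map rn cn (setCell g d.1 d.2 4) ds

-- big-endian 1/4 value list of the mask m over n dots
def bits : Nat → Nat → List Int
  | 0, _ => []
  | k + 1, m => (if (m >>> k) &&& 1 == 0 then (1 : Int) else 4) :: bits k m

def setZip (g : List (List Int)) (ds : List (Nat × Nat)) (vs : List Int) : List (List Int) :=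
  (ds.zip vs).foldl (fun g pv => setCell g pv.1.1 pv.1.2 pv.2) g

def genLoop (g : List (List Int)) (ds xs : List (Nat × Nat)) : List Nat → Option (List (List Int))
  | [] => none
  | m :: rest =>
    let h := setZip g ds (bits ds.length m)
    if checkB h xs then some h else genLoop g ds xs rest

-- ---- shape/AgreeOff lemmas ----
theorem length_setCell (a : List (List Int)) (r c : Nat) (v : Int) :
    (setCell a r c v).length = a.length := by simp [setCell]

theorem rowLen_setCell (a : List (List Int)) (r c : Nat) (v : Int) (i : Nat) :
    rowLen (setCell a r c v) i = rowLen a i := by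
  unfold rowLen setCell
  rcases eq_or_ne i r with rfl | hne
  · rcases Nat.lt_or_ge i a.length with hlt | hge
    · simp [List.getD, List.getElem?_set_self hlt, List.getElem?_eq_getElem hlt]
    · rw [List.set_eq_of_length_le hge]
  · simp [List.getD, List.getElem?_set_ne (Ne.symm hne)]

theorem ent_setCell_ne (a : List (List Int)) (r c : Nat) (v : Int) (i j : Nat)
    (h : ¬(i = r ∧ j = c)) : ent (setCell a r c v) i j = ent a i j := by
  unfold ent setCell
  rcases eq_or_ne i r with rfl | hne
  · have hj : j ≠ c := fun hc => h ⟨rfl, hc⟩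
    rcases Nat.lt_or_ge i a.length with hlt | hge
    · simp [List.getD, List.getElem?_set_self hlt, List.getElem?_eq_getElem hlt,
        List.getElem?_set_ne (Ne.symm hj)]
    · rw [List.set_eq_of_length_le hge]
  · simp [List.getD, List.getElem?_set_ne (Ne.symm hne)]

theorem ent_setCell_self (a : List (List Int)) (r c : Nat) (v : Int) :
    ent (setCell a r c v) r c = if r < a.length ∧ c < rowLen a r then v else 0 := by
  unfold ent setCell rowLen
  rcases Nat.lt_or_ge r a.length with hlt | hge
  · have hrw : (a.set r ((a.getD r []).set c v)).getD r [] = (a.getD r []).set c v := by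
      simp [List.getD, List.getElem?_set_self hlt]
    rw [hrw]
    rcases Nat.lt_or_ge c (a.getD r []).length with hc | hc
    · rw [List.getD_eq_getElem _ _ (by simpa using hc), List.getElem_set_self]
      rw [if_pos ⟨hlt, hc⟩]
    · rw [List.set_eq_of_length_le hc, List.getD_eq_default _ _ hc]
      rw [if_neg (fun hcon => absurd hcon.2 (Nat.not_lt.mpr hc))]
  · rw [List.set_eq_of_length_le hge, List.getD_eq_default _ _ hge]
    simp [Nat.not_lt.mpr hge]

theorem ent_setCell_same (a b : List (List Int)) (r c : Nat) (v : Int)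
    (hl : a.length = b.length) (hr : rowLen a r = rowLen b r) :
    ent (setCell a r c v) r c = ent (setCell b r c v) r c := by
  rw [ent_setCell_self, ent_setCell_self, hl, hr]

theorem AgreeOff_refl (D a) : AgreeOff D a a := ⟨rfl, fun _ => rfl, fun _ _ _ => rfl⟩

theorem AgreeOff_nil_eq (a b : List (List Int)) (h : AgreeOff [] a b) : a = b := by
  obtain ⟨hl, hrow, hent⟩ := h
  apply List.ext_getElem hl
  intro i h1 h2
  apply List.ext_getElem
  · have := hrow i
    unfold rowLen at this
    rwa [List.getD_eq_getElem _ _ h1, List.getD_eq_getElem _ _ h2] at this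
  · intro j hj1 hj2
    have := hent i j (by simp)
    unfold ent at this
    rwa [List.getD_eq_getElem _ _ h1, List.getD_eq_getElem _ _ h2,
      List.getD_eq_getElem _ _ hj1, List.getD_eq_getElem _ _ hj2] at this

theorem AgreeOff_set (D : List (Nat × Nat)) (a b : List (List Int)) (d : Nat × Nat) (v : Int)
    (h : AgreeOff (d :: D) a b) :
    AgreeOff D (setCell a d.1 d.2 v) (setCell b d.1 d.2 v) := by
  obtain ⟨hl, hrow, hent⟩ := h
  refine ⟨by rw [length_setCell, length_setCell, hl],
    fun r => by rw [rowLen_setCell, rowLen_setCell]; exact hrow r, ?_⟩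
  intro r c hno
  by_cases hrc : r = d.1 ∧ c = d.2
  · rw [hrc.1, hrc.2]
    exact ent_setCell_same a b d.1 d.2 v hl (hrow d.1)
  · rw [ent_setCell_ne a _ _ _ _ _ hrc, ent_setCell_ne b _ _ _ _ _ hrc]
    refine hent r c ?_
    simp only [List.mem_cons, not_or]
    exact ⟨fun he => hrc (by cases he; exact ⟨rfl, rfl⟩), hno⟩

theorem AgreeOff_of_set_right (D : List (Nat × Nat)) (a b : List (List Int)) (d : Nat × Nat)
    (v : Int) (h : AgreeOff D a (setCell b d.1 d.2 v)) : AgreeOff (d :: D) a b := by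
  obtain ⟨hl, hrow, hent⟩ := h
  refine ⟨by rw [hl, length_setCell], fun r => by rw [hrow r, rowLen_setCell], ?_⟩
  intro r c hno
  simp only [List.mem_cons, not_or] at hno
  have hrc : ¬(r = d.1 ∧ c = d.2) := by
    rintro ⟨rfl, rfl⟩; exact hno.1 (by simp)
  rw [hent r c hno.2, ent_setCell_ne b _ _ _ _ _ hrc]

def rowDots (map : List (List String)) (cn : Nat) (r : Nat) : List (Nat × Nat) :=
  (List.range cn).filterMap fun c => if cellStr map r c == "." then some (r, c) else none

theorem dotsFrom_stop (map : List (List String)) (rn cn ri ci : Nat) (h : rn ≤ ri) :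
    dotsFrom map rn cn ri ci = [] := by
  rw [dotsFrom, dif_pos (Or.inl h)]

theorem dotsFrom_gen (map : List (List String)) (rn cn : Nat) :
    ∀ k ri ci, (rn - ri) * cn + (cn - ci) ≤ k → ri < rn → ci < cn →
      dotsFrom map rn cn ri ci =
        ((List.range' ci (cn - ci)).filterMap fun c => if cellStr map ri c == "." then some (ri, c) else none) ++
          (List.range' (ri + 1) (rn - (ri + 1))).flatMap (rowDots map cn) := by
  intro k
  induction k with
  | zero => intro ri ci h hri hci; omega
  | succ k ih =>
    intro ri ci hk hri hci
    have e1 : (rn - (ri + 1)) * cn + cn = (rn - ri) * cn := by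
      have e : rn - ri = (rn - (ri + 1)) + 1 := by omega
      rw [e]; ring
    rw [dotsFrom, dif_neg (by rw [not_or]; exact ⟨by omega, by omega⟩)]
    by_cases hciq : ci = cn - 1
    · simp only [hciq, if_true]
      have hlast : cn - (cn - 1) = 1 := by omega
      rw [hlast, List.range'_one]
      rcases Nat.lt_or_ge (ri + 1) rn with h2 | h2
      · rw [ih (ri + 1) 0 (by omega) h2 (by omega)]
        rw [Nat.sub_zero, show rn - (ri + 1) = (rn - (ri + 2)) + 1 from by omega, List.range'_succ]
        rw [List.flatMap_cons]
        rw [show rowDots map cn (ri + 1) =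
            (List.range' 0 cn).filterMap
              (fun c => if cellStr map (ri + 1) c == "." then some (ri + 1, c) else none) from by
          rw [rowDots, List.range_eq_range']]
        rw [← hciq]
        by_cases hdot : cellStr map ri ci = "." <;>
          simp [hdot, (by omega : ri + 1 + 1 = ri + 2)]
      · rw [dotsFrom_stop map rn cn (ri + 1) 0 h2,
          show rn - (ri + 1) = 0 from by omega]
        rw [← hciq]
        by_cases hdot : cellStr map ri ci = "." <;> simp [hdot]
    · simp only [hciq, if_false]
      rw [ih ri (ci + 1) (by omega) hri (by omega)]
      rw [show cn - ci = (cn - (ci + 1)) + 1 from by omega, List.range'_succ]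
      by_cases hdot : cellStr map ri ci = "." <;> simp [hdot]

theorem dotsFrom_eq_dotsOf (map : List (List String)) (rn cn : Nat) (hcn : 1 ≤ cn) :
    dotsFrom map rn cn 0 0 = dotsOf map rn cn := by
  rcases Nat.eq_zero_or_pos rn with h0 | hpos
  · rw [dotsFrom_stop map rn cn 0 0 (by omega)]
    rw [dotsOf, h0]
    rfl
  · rw [dotsFrom_gen map rn cn ((rn - 0) * cn + (cn - 0)) 0 0 (Nat.le_refl _) hpos hcn]
    rw [show dotsOf map rn cn = (List.range rn).flatMap (rowDots map cn) from rfl]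
    rw [List.range_eq_range', show rn = (rn - 1) + 1 from by omega, List.range'_succ,
      List.flatMap_cons]
    rw [Nat.sub_zero, show rowDots map cn 0 =
        (List.range' 0 cn).filterMap (fun c => if cellStr map 0 c == "." then some (0, c) else none) from by
      rw [rowDots, List.range_eq_range']]
    rfl

-- ---- the main A-side lemma: explore computes searchS over dotsFrom ----
theorem explore_eq_search (map : List (List String)) (rn cn : Nat) :
    ∀ fuel ri ci a b, ri ≤ rn → ci < cn → (rn - ri) * cn + (cn - ci) ≤ fuel →
      AgreeOff (dotsFrom map rn cn ri ci) a b →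
      searchS map rn cn b (dotsFrom map rn cn ri ci) =
        (if (explore map rn cn fuel ri ci a).1 then some (explore map rn cn fuel ri ci a).2 else none) ∧
      AgreeOff (dotsFrom map rn cn ri ci) (explore map rn cn fuel ri ci a).2 b := by
  intro fuel
  induction fuel with
  | zero => intro ri ci a b hri hci hfuel hrel; omega
  | succ fuel ih =>
    intro ri ci a b hri hci hfuel hrel
    by_cases hend : ri = rn
    · have hstop : dotsFrom map rn cn ri ci = [] := by
        rw [hend]; exact dotsFrom_stop map rn cn rn ci (Nat.le_refl _)
      rw [hstop] at hrel ⊢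
      have heq : a = b := AgreeOff_nil_eq a b hrel
      have hexp : explore map rn cn (fuel + 1) ri ci a = (checkA map rn cn a, a) := by
        simp only [explore, if_pos hend]
      rw [hexp]
      subst heq
      constructor
      · by_cases hc : checkA map rn cn a <;> simp [searchS, hc]
      · simpa using hrel
    · have hlt : ri < rn := Nat.lt_of_le_of_ne hri hend
      have e1 : (rn - (ri + 1)) * cn + cn = (rn - ri) * cn := by
        have e : rn - ri = (rn - (ri + 1)) + 1 := by omega
        rw [e]; ring
      set p := (if ci = cn - 1 then (ri + 1, 0) else (ri, ci + 1)) with hp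
      have hp1 : p.1 ≤ rn := by rw [hp]; split <;> simp only <;> omega
      have hp2 : p.2 < cn := by rw [hp]; split <;> simp only <;> omega
      have hp3 : (rn - p.1) * cn + (cn - p.2) ≤ fuel := by
        rw [hp]; split <;> simp only <;> omega
      have hD : dotsFrom map rn cn ri ci =
          (if cellStr map ri ci == "." then [(ri, ci)] else []) ++ dotsFrom map rn cn p.1 p.2 := by
        rw [dotsFrom, dif_neg (by rw [not_or]; exact ⟨by omega, by omega⟩)]
      have hexp : explore map rn cn (fuel + 1) ri ci a =
          (if cellStr map ri ci == "." then
            (let r1 := explore map rn cn fuel p.1 p.2 (setCell a ri ci 1);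
             if r1.1 then r1
             else (let r4 := explore map rn cn fuel p.1 p.2 (setCell r1.2 ri ci 4);
                   if r4.1 then r4 else (false, r4.2)))
          else explore map rn cn fuel p.1 p.2 a) := by
        rw [hp]; simp only [explore, if_neg hend]
      by_cases hdot : cellStr map ri ci == "."
      · rw [if_pos hdot] at hexp
        rw [hD, if_pos hdot] at hrel ⊢
        simp only [List.singleton_append] at hrel ⊢
        have hrel1 : AgreeOff (dotsFrom map rn cn p.1 p.2)
            (setCell a ri ci 1) (setCell b ri ci 1) :=
          AgreeOff_set _ a b (ri, ci) 1 hrel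
        obtain ⟨ih1a, ih1b⟩ :=
          ih p.1 p.2 (setCell a ri ci 1) (setCell b ri ci 1) hp1 hp2 hp3 hrel1
        rw [hexp]
        simp only [searchS, ih1a]
        by_cases h1 : (explore map rn cn fuel p.1 p.2 (setCell a ri ci 1)).1
        · simp only [h1, if_true]
          exact ⟨trivial, AgreeOff_of_set_right _ _ b (ri, ci) 1 ih1b⟩
        · simp only [h1, if_false, Bool.false_eq_true]
          have hrel1' : AgreeOff ((ri, ci) :: dotsFrom map rn cn p.1 p.2)
              (explore map rn cn fuel p.1 p.2 (setCell a ri ci 1)).2 b :=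
            AgreeOff_of_set_right _ _ b (ri, ci) 1 ih1b
          have hrel4 : AgreeOff (dotsFrom map rn cn p.1 p.2)
              (setCell (explore map rn cn fuel p.1 p.2 (setCell a ri ci 1)).2 ri ci 4)
              (setCell b ri ci 4) :=
            AgreeOff_set _ _ b (ri, ci) 4 hrel1'
          obtain ⟨ih4a, ih4b⟩ := ih p.1 p.2 _ (setCell b ri ci 4) hp1 hp2 hp3 hrel4
          rw [ih4a]
          by_cases h4 : (explore map rn cn fuel p.1 p.2
              (setCell (explore map rn cn fuel p.1 p.2 (setCell a ri ci 1)).2 ri ci 4)).1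
          · simp only [h4, if_true]
            exact ⟨trivial, AgreeOff_of_set_right _ _ b (ri, ci) 4 ih4b⟩
          · simp only [h4, if_false, Bool.false_eq_true]
            exact ⟨trivial, AgreeOff_of_set_right _ _ b (ri, ci) 4 ih4b⟩
      · rw [if_neg hdot] at hexp
        rw [hD, if_neg hdot] at hrel ⊢
        simp only [List.nil_append] at hrel ⊢
        rw [hexp]
        exact ih p.1 p.2 a b hp1 hp2 hp3 hrel

-- ---- the checks agree ----
theorem checkA_eq_checkB (map : List (List String)) (rn cn : Nat) (g : List (List Int)) :
    checkA map rn cn g = checkB g (xsOf map rn cn) := by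
  unfold checkA checkB xsOf
  rw [Bool.eq_iff_iff]
  simp only [List.all_eq_true, List.mem_flatMap, List.mem_filterMap, List.mem_range]
  constructor
  · rintro h p ⟨r, ⟨hr, c, hc, hx⟩⟩
    by_cases hcell : cellStr map r c == "X"
    · rw [if_pos hcell] at hx
      cases hx
      have h2 := h r hr c hc
      simp only [hcell, Bool.true_and, Bool.not_eq_eq_eq_not, Bool.not_true] at h2
      simpa [adjCoors] using h2
    · rw [if_neg hcell] at hx; cases hx
  · intro h r hr c hc
    by_cases hcell : cellStr map r c == "X"
    · have h2 := h (r, c) ⟨r, hr, c, hc, by rw [if_pos hcell]⟩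
      simp only [hcell, Bool.true_and, Bool.not_eq_eq_eq_not, Bool.not_true]
      simpa [adjCoors] using h2
    · simp [hcell]

-- ---- bits lemmas ----
theorem bits_low (k m : Nat) (h : m < 2 ^ k) : bits (k + 1) m = 1 :: bits k m := by
  simp [bits, Nat.shiftRight_eq_div_pow, Nat.div_eq_of_lt h]

theorem bits_add_pow_mul (k : Nat) : ∀ m c, bits k (m + 2 ^ k * c) = bits k m := by
  induction k with
  | zero => intro m c; rfl
  | succ k ih =>
    intro m c
    have harg : m + 2 ^ (k + 1) * c = m + 2 ^ k * (2 * c) := by ring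
    have hshift : (m + 2 ^ k * (2 * c)) >>> k % 2 = m >>> k % 2 := by
      rw [Nat.shiftRight_eq_div_pow, Nat.shiftRight_eq_div_pow,
        show 2 ^ k * (2 * c) = 2 * c * 2 ^ k from by ring,
        Nat.add_mul_div_right _ _ (by positivity : 0 < 2 ^ k)]
      omega
    simp only [bits, harg, Nat.and_one_is_mod, hshift, ih m (2 * c)]

theorem bits_high (k m : Nat) (h : m < 2 ^ k) : bits (k + 1) (2 ^ k + m) = 4 :: bits k m := by
  simp only [bits]
  have h1 : (2 ^ k + m) >>> k = 1 := by
    rw [Nat.shiftRight_eq_div_pow, Nat.add_comm, Nat.add_div_right _ (by positivity : 0 < 2 ^ k), Nat.div_eq_of_lt h]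
  have h2 : bits k (2 ^ k + m) = bits k m := by
    have := bits_add_pow_mul k m 1
    rw [Nat.mul_one] at this
    rw [Nat.add_comm]
    exact this
  rw [h1, h2]
  rfl

-- ---- B's loop equals genLoop, and genLoop equals searchS ----
theorem if_shift_congr (m x y : Nat) (h : x = y) :
    (if (m >>> x) &&& 1 == 0 then (1 : Int) else 4) = (if (m >>> y) &&& 1 == 0 then (1 : Int) else 4) := by
  rw [h]

theorem map_range_eq_bits (n : Nat) :
    ∀ m, ((List.range n).map fun i => if (m >>> (n - 1 - i)) &&& 1 == 0 then (1 : Int) else 4) = bits n m := by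
  induction n with
  | zero => intro m; rfl
  | succ n ih =>
    intro m
    rw [List.range_succ_eq_map]
    simp only [List.map_cons, List.map_map, bits]
    rw [List.cons_eq_cons]
    constructor
    · exact if_shift_congr m _ _ (by omega)
    · rw [← ih m]
      exact List.map_congr_left fun i _ => by
        simp only [Function.comp_apply]
        exact if_shift_congr m _ _ (by omega)

theorem loopB_eq_genLoop (_map : List (List String)) (rn cn : Nat) (dots xs : List (Nat × Nat)) :
    ∀ ms, loopB rn cn dots.length dots xs ms =
      genLoop (List.replicate rn (List.replicate cn (0 : Int))) dots xs ms := by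
  intro ms
  induction ms with
  | nil => rfl
  | cons m rest ih =>
    simp only [loopB, genLoop, buildGrid, setZip, map_range_eq_bits]
    rw [ih]

theorem genLoop_append (g : List (List Int)) (ds xs : List (Nat × Nat)) (ms1 ms2 : List Nat) :
    genLoop g ds xs (ms1 ++ ms2) =
      match genLoop g ds xs ms1 with
      | some r => some r
      | none => genLoop g ds xs ms2 := by
  induction ms1 with
  | nil => rfl
  | cons m t ih =>
    simp only [List.cons_append, genLoop]
    by_cases h : checkB (setZip g ds (bits ds.length m)) xs <;> simp [h, ih]

theorem genLoop_low (g : List (List Int)) (d : Nat × Nat) (ds xs : List (Nat × Nat)) :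
    ∀ ms, (∀ m ∈ ms, m < 2 ^ ds.length) →
      genLoop g (d :: ds) xs ms = genLoop (setCell g d.1 d.2 1) ds xs ms := by
  intro ms
  induction ms with
  | nil => intro _; rfl
  | cons m t ih =>
    intro h
    simp only [genLoop, List.length_cons, bits_low _ _ (h m List.mem_cons_self)]
    rw [show setZip g (d :: ds) (1 :: bits ds.length m) =
        setZip (setCell g d.1 d.2 1) ds (bits ds.length m) from rfl]
    rw [ih fun x hx => h x (List.mem_cons_of_mem _ hx)]

theorem genLoop_high (g : List (List Int)) (d : Nat × Nat) (ds xs : List (Nat × Nat)) :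
    ∀ ms, (∀ m ∈ ms, m < 2 ^ ds.length) →
      genLoop g (d :: ds) xs (ms.map (2 ^ ds.length + ·)) = genLoop (setCell g d.1 d.2 4) ds xs ms := by
  intro ms
  induction ms with
  | nil => intro _; rfl
  | cons m t ih =>
    intro h
    simp only [List.map_cons, genLoop, List.length_cons, bits_high _ _ (h m List.mem_cons_self)]
    rw [show setZip g (d :: ds) (4 :: bits ds.length m) =
        setZip (setCell g d.1 d.2 4) ds (bits ds.length m) from rfl]
    rw [ih fun x hx => h x (List.mem_cons_of_mem _ hx)]

theorem search_eq_genLoop (map : List (List String)) (rn cn : Nat) :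
    ∀ ds g, searchS map rn cn g ds = genLoop g ds (xsOf map rn cn) (List.range (2 ^ ds.length)) := by
  intro ds
  induction ds with
  | nil =>
    intro g
    simp only [searchS, List.length_nil, pow_zero, List.range_one, genLoop]
    rw [show setZip g [] (bits 0 0) = g from rfl, checkA_eq_checkB map rn cn g]
  | cons d ds ih =>
    intro g
    have hsplit : List.range (2 ^ (d :: ds).length) =
        List.range (2 ^ ds.length) ++ (List.range (2 ^ ds.length)).map (2 ^ ds.length + ·) := by
      rw [List.length_cons, pow_succ, Nat.mul_two, List.range_add]
    rw [hsplit, genLoop_append,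
      genLoop_low g d ds _ _ (fun m hm => List.mem_range.mp hm),
      genLoop_high g d ds _ _ (fun m hm => List.mem_range.mp hm)]
    simp only [searchS]
    rw [ih (setCell g d.1 d.2 1), ih (setCell g d.1 d.2 4)]

-- ===== VERDICT (by name: the statement is the Claim_ definition above) =====
theorem solve0_spec : Claim_equal_solve0 := by
  intro map _ hpre
  obtain ⟨hne, hcn, _, _⟩ := hpre
  unfold Spec_solve0 solve0 solve0_alt
  simp only [Nat.one_shiftLeft]
  rw [loopB_eq_genLoop map map.length (map.headD []).length (dotsOf map map.length (map.headD []).length) (xsOf map map.length (map.headD []).length)]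
  rw [← search_eq_genLoop map map.length (map.headD []).length (dotsOf map map.length (map.headD []).length)]
  rw [← dotsFrom_eq_dotsOf map map.length (map.headD []).length hcn]
  obtain ⟨hA, _⟩ := explore_eq_search map map.length (map.headD []).length
    (map.length * (map.headD []).length + (map.headD []).length) 0 0
    (List.replicate map.length (List.replicate (map.headD []).length (0 : Int)))
    (List.replicate map.length (List.replicate (map.headD []).length (0 : Int)))
    (Nat.zero_le _) (by omega) (by simp) (AgreeOff_refl _ _)
  exact hA.symm
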